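-- pv_equiv track=rewrite | github.com/BlancoSebastianEzequiel/7526-TP1 | src/problem_8.py | gaps_calculator
-- ===== SOURCE A (Python) =====
-- def gaps_calculator(sample, segment):
--     gaps_target = []
--     target_counter = 0
--     target_start_counting = False
--
--     for value in sample:
--         if target_start_counting: target_counter += 1
--
--         if (segment[0] <= value and value <= segment[1]):
--             if not target_start_counting:
--                 target_start_counting = True
--             else:
--                 gaps_target.append(target_counter - 1) # Save the distance between repetitions
--                 target_counter = 0
--
--     return gaps_target
-- ===== SOURCE B (Python) =====
-- def gaps_calculator(sample, segment):
--     idx = [i for i, v in enumerate(sample) if segment[0] <= v <= segment[1]]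
--     return [j - i - 1 for i, j in zip(idx, idx[1:])]
-- ===== Notes on version B (the rewrite author's own statement) =====
-- stated objective: simpler
-- what changed: Replaced A's single-pass boolean-flag-plus-counter state machine with two passes: collect the positions of in-segment values, then take pairwise differences minus one.
import Mathlib
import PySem

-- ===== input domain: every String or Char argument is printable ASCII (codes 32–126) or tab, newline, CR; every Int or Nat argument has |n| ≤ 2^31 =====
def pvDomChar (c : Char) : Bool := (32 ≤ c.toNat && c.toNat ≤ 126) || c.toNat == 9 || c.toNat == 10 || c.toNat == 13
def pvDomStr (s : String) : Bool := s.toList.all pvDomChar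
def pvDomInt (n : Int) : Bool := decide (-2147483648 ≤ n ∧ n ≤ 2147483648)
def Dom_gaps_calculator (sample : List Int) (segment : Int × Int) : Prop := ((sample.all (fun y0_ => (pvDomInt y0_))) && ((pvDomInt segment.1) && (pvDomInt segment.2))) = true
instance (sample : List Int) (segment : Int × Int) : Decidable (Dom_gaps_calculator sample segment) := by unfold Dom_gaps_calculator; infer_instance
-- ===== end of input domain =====

-- B replaces A's flag-and-counter state machine by two passes (collect match positions, then pairwise differences); objective: simpler.

-- ===== PORT A =====
-- the for loop of A as structural recursion over the same state (gaps, counter, started)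
def gapsLoopA (segment : Int × Int) : List Int → List Int → Int → Bool → List Int
  | [], gaps, _, _ => gaps
  | value :: rest, gaps, counter, started =>
    let c := if started then counter + 1 else counter
    if segment.1 ≤ value ∧ value ≤ segment.2 then
      if !started then gapsLoopA segment rest gaps c true
      else gapsLoopA segment rest (gaps ++ [c - 1]) 0 true
    else gapsLoopA segment rest gaps c started

def gaps_calculator (sample : List Int) (segment : Int × Int) : List Int :=
  gapsLoopA segment sample [] 0 false

-- ===== PORT B =====
-- the comprehension over enumerate(sample): positions (as Int, starting at i) of in-segment values
def collectIdx (segment : Int × Int) (i : Int) : List Int → List Int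
  | [] => []
  | v :: rest =>
    if segment.1 ≤ v ∧ v ≤ segment.2 then i :: collectIdx segment (i + 1) rest
    else collectIdx segment (i + 1) rest

def gaps_calculator_alt (sample : List Int) (segment : Int × Int) : List Int :=
  let idx := collectIdx segment 0 sample
  (idx.zip idx.tail).map (fun p => p.2 - p.1 - 1)

-- ===== PRECONDITION & SPEC =====
def Spec_gaps_calculator (sample : List Int) (segment : Int × Int) (out : List Int) : Prop := out = gaps_calculator_alt sample segment
instance (sample : List Int) (segment : Int × Int) (out : List Int) : Decidable (Spec_gaps_calculator sample segment out) := by unfold Spec_gaps_calculator; infer_instance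

-- ===== CLAIM (what is proved, stated in full; the proofs are below) =====
def Claim_equal_gaps_calculator : Prop := ∀ (sample : List Int) (segment : Int × Int), Dom_gaps_calculator sample segment → Spec_gaps_calculator sample segment (gaps_calculator sample segment)

-- ===== LEMMAS AND PROOFS =====

-- A's loop after the first match: counter c entering a step, emit c on a match, reset
def gRun (segment : Int × Int) : List Int → Int → List Int
  | [], _ => []
  | v :: rest, c =>
    if segment.1 ≤ v ∧ v ≤ segment.2 then c :: gRun segment rest 0
    else gRun segment rest (c + 1)

-- A's loop before the first match
def hRun (segment : Int × Int) : List Int → List Int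
  | [] => []
  | v :: rest =>
    if segment.1 ≤ v ∧ v ≤ segment.2 then gRun segment rest 0
    else hRun segment rest

-- pairwise gaps of a position list with the previous match at j
def pairGaps (j : Int) : List Int → List Int
  | [] => []
  | a :: l => (a - j - 1) :: pairGaps a l

theorem gapsLoopA_started (segment : Int × Int) :
    ∀ (xs gaps : List Int) (c : Int),
      gapsLoopA segment xs gaps c true = gaps ++ gRun segment xs c := by
  intro xs
  induction xs with
  | nil => intro gaps c; simp [gapsLoopA, gRun]
  | cons v rest ih =>
    intro gaps c
    by_cases hv : segment.1 ≤ v ∧ v ≤ segment.2 <;>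
      simp [gapsLoopA, gRun, hv, ih]

theorem gapsLoopA_unstarted (segment : Int × Int) :
    ∀ (xs gaps : List Int),
      gapsLoopA segment xs gaps 0 false = gaps ++ hRun segment xs := by
  intro xs
  induction xs with
  | nil => intro gaps; simp [gapsLoopA, hRun]
  | cons v rest ih =>
    intro gaps
    by_cases hv : segment.1 ≤ v ∧ v ≤ segment.2 <;>
      simp [gapsLoopA, hRun, hv, ih, gapsLoopA_started]

theorem gRun_eq_pairGaps (segment : Int × Int) :
    ∀ (xs : List Int) (i j : Int),
      gRun segment xs (i - j - 1) = pairGaps j (collectIdx segment i xs) := by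
  intro xs
  induction xs with
  | nil => intro i j; simp [gRun, collectIdx, pairGaps]
  | cons v rest ih =>
    intro i j
    by_cases hv : segment.1 ≤ v ∧ v ≤ segment.2
    · have h0 : (0 : Int) = (i + 1) - i - 1 := by ring
      simp only [gRun, collectIdx, hv, and_self, ite_true, pairGaps]
      rw [h0, ih (i + 1) i]
    · have h1 : i - j - 1 + 1 = (i + 1) - j - 1 := by ring
      simp only [gRun, collectIdx, hv, if_neg, not_false_iff]
      rw [h1, ih (i + 1) j]

theorem pairGaps_eq_zip (j : Int) :
    ∀ l : List Int,
      pairGaps j l = ((j :: l).zip l).map (fun p => p.2 - p.1 - 1) := by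
  intro l
  induction l generalizing j with
  | nil => simp [pairGaps]
  | cons a l ih => simp [pairGaps, ih a]

theorem hRun_eq_gaps (segment : Int × Int) :
    ∀ (xs : List Int) (i : Int),
      hRun segment xs =
        ((collectIdx segment i xs).zip (collectIdx segment i xs).tail).map
          (fun p => p.2 - p.1 - 1) := by
  intro xs
  induction xs with
  | nil => intro i; simp [hRun, collectIdx]
  | cons v rest ih =>
    intro i
    by_cases hv : segment.1 ≤ v ∧ v ≤ segment.2
    · have h0 : (0 : Int) = (i + 1) - i - 1 := by ring
      simp only [hRun, collectIdx, hv, and_self, ite_true, List.tail_cons]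
      rw [h0, gRun_eq_pairGaps segment rest (i + 1) i, pairGaps_eq_zip]
    · simp only [hRun, collectIdx, hv, if_neg, not_false_iff]
      exact ih (i + 1)

-- ===== VERDICT (by name: the statement is the Claim_ definition above) =====
theorem gaps_calculator_spec : Claim_equal_gaps_calculator := by
  intro sample segment _
  unfold Spec_gaps_calculator gaps_calculator gaps_calculator_alt
  rw [gapsLoopA_unstarted, hRun_eq_gaps segment sample 0]
  simp
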